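-- pv_equiv track=rewrite | github.com/anurag9601/brocode_challenge | 2025/python/1_january/18_jan.py | consecutive_combo
-- ===== SOURCE A (Python) =====
-- def consecutive_combo(lst1, lst2):
--     merge_lst = lst1 + lst2
--
--     for i in range(len(merge_lst)):
--         mini_i = i
--         for j in range(i, len(merge_lst)):
--             if(merge_lst[mini_i] > merge_lst[j]):
--                 mini_i = j
--         merge_lst[i],merge_lst[mini_i] = merge_lst[mini_i],merge_lst[i]
--
--     for num in range(merge_lst[0], merge_lst[-1]+1):
--         if(num not in merge_lst):
--             return False
--
--     return True
-- ===== SOURCE B (Python) =====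
-- def consecutive_combo(lst1, lst2):
--     merged = sorted(lst1 + lst2)
--     return len(set(merged)) == merged[-1] - merged[0] + 1
-- ===== Notes on version B (the rewrite author's own statement) =====
-- stated objective: simpler
-- what changed: Replaced the hand-written O(n^2) selection sort plus a membership scan of the whole value range with sorted() and a single distinct-count comparison len(set(merged)) == max - min + 1.
import Mathlib
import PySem

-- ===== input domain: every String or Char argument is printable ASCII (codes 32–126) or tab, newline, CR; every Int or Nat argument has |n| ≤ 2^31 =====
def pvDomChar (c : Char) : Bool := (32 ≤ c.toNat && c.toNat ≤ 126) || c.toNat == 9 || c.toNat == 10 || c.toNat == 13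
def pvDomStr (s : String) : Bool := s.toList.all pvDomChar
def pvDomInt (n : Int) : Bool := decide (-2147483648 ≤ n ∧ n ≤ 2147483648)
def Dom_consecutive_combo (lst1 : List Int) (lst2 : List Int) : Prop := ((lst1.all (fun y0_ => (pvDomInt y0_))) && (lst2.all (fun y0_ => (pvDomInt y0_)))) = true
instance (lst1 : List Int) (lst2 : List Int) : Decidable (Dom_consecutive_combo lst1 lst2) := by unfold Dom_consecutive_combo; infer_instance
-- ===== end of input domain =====

-- B replaces A's hand-written selection sort + full-range membership scan by sorted() and a
-- single distinct-count comparison len(set(merged)) == max - min + 1.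


-- ===== PORT A =====
-- one iteration of A's outer loop: scan 'for j in range(i, len(merge_lst))' for the index of the
-- minimum of merge_lst[i:], then swap it with position i (RHS-first tuple assignment)
def pvSelStep (ml : List Int) (i : Nat) : List Int :=
  let mini := (List.range' i (ml.length - i)).foldl
      (fun m j => if ml.getD m 0 > ml.getD j 0 then j else m) i
  let vi := ml.getD i 0
  let vm := ml.getD mini 0
  (ml.set i vm).set mini vi

-- 'for num in range(merge_lst[0], merge_lst[-1]+1)' with its early 'return False':
-- iterated lazily like Python's range (stops at the first missing value)
def pvRangeLoop (ml : List Int) (num b : Int) : Bool :=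
  if h : num < b then
    (if ml.contains num then pvRangeLoop ml (num + 1) b else false)
  else true
  termination_by (b - num).toNat
  decreasing_by omega

def consecutive_combo (lst1 : List Int) (lst2 : List Int) : Bool :=
  let merge0 := lst1 ++ lst2
  let ml := (List.range merge0.length).foldl pvSelStep merge0
  match PySem.List.pyGet? ml 0, PySem.List.pyGet? ml (-1) with
  | some lo, some hi => pvRangeLoop ml lo (hi + 1)
  | _, _ => false   -- merge_lst[0] raises IndexError on the empty list; excluded by Pre_

-- ===== PORT B =====
def consecutive_combo_alt (lst1 : List Int) (lst2 : List Int) : Bool :=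
  let merged := PySem.List.sorted (lst1 ++ lst2) (fun x => x) false
  match PySem.List.pyGet? merged (-1) with   -- merged[-1] first: IndexError on empty, excluded by Pre_
  | none => false
  | some hi =>
    match PySem.List.pyGet? merged 0 with
    | none => false
    | some lo => ((PySem.Set.ofList merged).length : Int) == hi - lo + 1

-- ===== PRECONDITION & SPEC =====
-- Pre_ excludes exactly the empty combined input, on which the Python A raises IndexError
-- (merge_lst[0]); B's Python raises IndexError there too (merged[-1]).
def Pre_consecutive_combo (lst1 : List Int) (lst2 : List Int) : Prop := lst1 ++ lst2 ≠ []
instance (lst1 : List Int) (lst2 : List Int) : Decidable (Pre_consecutive_combo lst1 lst2) := by unfold Pre_consecutive_combo; infer_instance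
def pvWitness_consecutive_combo : List Int × List Int := ([1, 3], [2])

def Spec_consecutive_combo (lst1 : List Int) (lst2 : List Int) (out : Bool) : Prop := out = consecutive_combo_alt lst1 lst2
instance (lst1 : List Int) (lst2 : List Int) (out : Bool) : Decidable (Spec_consecutive_combo lst1 lst2 out) := by unfold Spec_consecutive_combo; infer_instance

-- ===== CLAIM (what is proved, stated in full; the proofs are below) =====
def Claim_equal_consecutive_combo : Prop := ∀ (lst1 : List Int) (lst2 : List Int), Dom_consecutive_combo lst1 lst2 → Pre_consecutive_combo lst1 lst2 → Spec_consecutive_combo lst1 lst2 (consecutive_combo lst1 lst2)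

-- ===== LEMMAS AND PROOFS =====

-- counting after a single in-place update
theorem count_set' (l : List Int) (n : Nat) (h : n < l.length) (b x : Int) :
    (l.set n b).count x + (if l[n] = x then 1 else 0)
      = l.count x + (if b = x then 1 else 0) := by
  rw [List.set_eq_take_cons_drop b h]
  conv_rhs => rw [← List.take_append_drop n l, List.drop_eq_getElem_cons h]
  simp only [List.count_append, List.count_cons]
  split_ifs <;> simp_all <;> omega

-- A's tuple-assignment swap is a permutation
theorem swap_perm (l : List Int) (i j : Nat) (hi : i < l.length) (hj : j < l.length) :
    ((l.set i (l.getD j 0)).set j (l.getD i 0)).Perm l := by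
  rw [List.getD_eq_getElem l 0 hi, List.getD_eq_getElem l 0 hj]
  rcases eq_or_ne i j with rfl | hne
  · rw [List.set_set, List.set_getElem_self hi]
  · rw [List.perm_iff_count]
    intro x
    have h1 := count_set' l i hi l[j] x
    have hj' : j < (l.set i l[j]).length := by simpa using hj
    have h2 := count_set' (l.set i l[j]) j hj' l[i] x
    rw [List.getElem_set_ne (by omega)] at h2
    split_ifs at h1 h2 <;> omega

-- A's inner 'mini_i' scan returns an index of a minimum of the scanned positions
theorem argmin_fold (ml : List Int) (js : List Nat) (m : Nat) :
    ((js.foldl (fun m j => if ml.getD m 0 > ml.getD j 0 then j else m) m) = m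
       ∨ (js.foldl (fun m j => if ml.getD m 0 > ml.getD j 0 then j else m) m) ∈ js)
    ∧ ml.getD (js.foldl (fun m j => if ml.getD m 0 > ml.getD j 0 then j else m) m) 0 ≤ ml.getD m 0
    ∧ ∀ j ∈ js, ml.getD (js.foldl (fun m j => if ml.getD m 0 > ml.getD j 0 then j else m) m) 0 ≤ ml.getD j 0 := by
  induction js generalizing m with
  | nil => simp
  | cons a t ih =>
    simp only [List.foldl_cons, List.mem_cons]
    by_cases h : ml.getD m 0 > ml.getD a 0
    · simp only [if_pos h]
      obtain ⟨h1, h2, h3⟩ := ih a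
      refine ⟨?_, by omega, ?_⟩
      · rcases h1 with h1 | h1
        · exact Or.inr (Or.inl h1)
        · exact Or.inr (Or.inr h1)
      · intro j hj
        rcases hj with rfl | hj
        · exact h2
        · exact h3 j hj
    · simp only [if_neg h]
      obtain ⟨h1, h2, h3⟩ := ih m
      refine ⟨?_, h2, ?_⟩
      · rcases h1 with h1 | h1
        · exact Or.inl h1
        · exact Or.inr (Or.inr h1)
      · intro j hj
        rcases hj with rfl | hj
        · omega
        · exact h3 j hj

theorem pvSelStep_spec (s : List Int) (k : Nat) (hkl : k < s.length) :
    ∃ mini, k ≤ mini ∧ mini < s.length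
      ∧ (∀ j, k ≤ j → j < s.length → s.getD mini 0 ≤ s.getD j 0)
      ∧ pvSelStep s k = (s.set k (s.getD mini 0)).set mini (s.getD k 0) := by
  obtain ⟨h1, h2, h3⟩ := argmin_fold s (List.range' k (s.length - k)) k
  refine ⟨_, ?_, ?_, ?_, rfl⟩
  · rcases h1 with h1 | h1
    · omega
    · have := List.mem_range'_1.mp h1; omega
  · rcases h1 with h1 | h1
    · omega
    · have := List.mem_range'_1.mp h1; omega
  · intro j hj1 hj2
    exact h3 j (List.mem_range'_1.mpr ⟨hj1, by omega⟩)

theorem getD_swap (s : List Int) (k mini : Nat) (hk : k < s.length) (hm : mini < s.length)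
    (x : Nat) (hx : x < s.length) :
    ((s.set k (s.getD mini 0)).set mini (s.getD k 0)).getD x 0
      = if x = mini then s.getD k 0 else if x = k then s.getD mini 0 else s.getD x 0 := by
  have hx1 : x < ((s.set k (s.getD mini 0)).set mini (s.getD k 0)).length := by simpa using hx
  rw [List.getD_eq_getElem _ 0 hx1]
  split_ifs with e1 e2
  · subst e1; rw [List.getElem_set_self (by simpa using hx)]
  · subst e2
    rw [List.getElem_set_ne (by omega), List.getElem_set_self (by simpa using hx),
        List.getD_eq_getElem _ 0 hm]
  · rw [List.getElem_set_ne (by omega), List.getElem_set_ne (by omega),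
        List.getD_eq_getElem _ 0 hx]

-- loop invariant of A's outer loop: after k passes the list is a permutation of the input
-- whose first k positions are in place (each ≤ everything to its right)
theorem selsort_inv (l : List Int) (k : Nat) (hk : k ≤ l.length) :
    ((List.range k).foldl pvSelStep l).Perm l
    ∧ ∀ x y, x < y → y < ((List.range k).foldl pvSelStep l).length → x < k →
        ((List.range k).foldl pvSelStep l).getD x 0 ≤ ((List.range k).foldl pvSelStep l).getD y 0 := by
  induction k with
  | zero => simp
  | succ k ih =>
    obtain ⟨hperm, hsort⟩ := ih (by omega)
    rw [List.range_succ, List.foldl_append, List.foldl_cons, List.foldl_nil]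
    set s := (List.range k).foldl pvSelStep l with hs
    have hlen : s.length = l.length := hperm.length_eq
    have hkl : k < s.length := by omega
    obtain ⟨mini, hm1, hm2, hmin, heq⟩ := pvSelStep_spec s k hkl
    rw [heq]
    constructor
    · exact (swap_perm s k mini hkl hm2).trans hperm
    · intro x y hxy hylen hxk
      have hylen' : y < s.length := by simpa using hylen
      have hxlen : x < s.length := by omega
      rw [getD_swap s k mini hkl hm2 x hxlen, getD_swap s k mini hkl hm2 y hylen']
      rcases Nat.lt_or_ge x k with hxk' | hxk'
      · rw [if_neg (by omega), if_neg (by omega)]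
        split_ifs with e1 e2
        · exact hsort x k (by omega) (by omega) hxk'
        · exact hsort x mini (by omega) (by omega) hxk'
        · exact hsort x y hxy (by omega) hxk'
      · have hxk'' : x = k := by omega
        subst hxk''
        by_cases hkm : x = mini
        · subst hkm
          rw [if_pos rfl, if_neg (by omega), if_neg (by omega)]
          exact hmin y (by omega) hylen'
        · rw [if_neg hkm, if_pos rfl]
          split_ifs with e1 e2
          · exact hmin x le_rfl hkl
          · omega
          · exact hmin y (by omega) hylen'

theorem pvRangeLoop_eq (ml : List Int) (a b : Int) :
    pvRangeLoop ml a b = (PySem.List.pyRange a b 1).all (fun num => ml.contains num) := by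
  suffices H : ∀ (n : Nat) (a : Int), (b - a).toNat ≤ n →
      pvRangeLoop ml a b = (PySem.List.pyRange a b 1).all (fun num => ml.contains num) from
    H (b - a).toNat a le_rfl
  intro n
  induction n with
  | zero =>
    intro a ha
    rw [pvRangeLoop, PySem.List.pyRange_one_eq_nil (by omega), dif_neg (by omega : ¬ a < b)]
    simp
  | succ n ih =>
    intro a ha
    rw [pvRangeLoop]
    by_cases h : a < b
    · rw [dif_pos h, PySem.List.pyRange_one_cons h, List.all_cons]
      cases hc : ml.contains a
      · simp
      · simp only [Bool.true_and]
        exact ih (a + 1) (by omega)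
    · rw [dif_neg h, PySem.List.pyRange_one_eq_nil (by omega)]
      simp

-- on a sorted nonempty list, "every value from first to last occurs"
-- is exactly "distinct count = last - first + 1"
theorem range_check_eq_card (s : List Int) (hne : s ≠ []) (hs : s.Pairwise (· ≤ ·)) :
    ((PySem.List.pyRange (s.getD 0 0) (s.getLast hne + 1) 1).all (fun num => s.contains num))
      = (((PySem.Set.ofList s).length : Int) == s.getLast hne - s.getD 0 0 + 1) := by
  have hlen : 0 < s.length := List.length_pos_iff.mpr hne
  set lo := s.getD 0 0 with hlo
  set hi := s.getLast hne with hhi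
  have hmem : ∀ x ∈ s, lo ≤ x ∧ x ≤ hi := by
    intro x hx
    obtain ⟨i, hi', rfl⟩ := List.mem_iff_getElem.mp hx
    have hp := List.pairwise_iff_getElem.mp hs
    constructor
    · rw [hlo, List.getD_eq_getElem s 0 hlen]
      rcases Nat.eq_zero_or_pos i with rfl | hpos
      · exact le_refl _
      · exact hp 0 i hlen hi' hpos
    · rw [hhi, List.getLast_eq_getElem]
      rcases Nat.lt_or_ge i (s.length - 1) with h | h
      · exact hp i (s.length - 1) hi' (by omega) h
      · have : i = s.length - 1 := by omega
        subst this; exact le_refl _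
  have hlohi : lo ≤ hi := by
    have := hmem lo (by rw [hlo, List.getD_eq_getElem s 0 hlen]; exact List.getElem_mem hlen)
    exact this.2
  have hT : (PySem.Set.ofList s).toFinset = s.toFinset := by
    ext x; simp [PySem.Set.mem_ofList]
  have hcard : (PySem.Set.ofList s).length = s.toFinset.card := by
    rw [← hT, List.toFinset_card_of_nodup (PySem.Set.nodup_ofList s)]
  have hsub : s.toFinset ⊆ Finset.Icc lo hi := by
    intro x hx
    rw [List.mem_toFinset] at hx
    exact Finset.mem_Icc.mpr (hmem x hx)
  have hIcc : (Finset.Icc lo hi).card = (hi + 1 - lo).toNat := Int.card_Icc lo hi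
  rcases Bool.eq_false_or_eq_true ((PySem.List.pyRange lo (hi + 1) 1).all (fun num => s.contains num)) with hA | hA
  · rw [hA]; symm
    rw [beq_iff_eq]
    rw [List.all_eq_true] at hA
    have hsup : Finset.Icc lo hi ⊆ s.toFinset := by
      intro x hx
      rw [Finset.mem_Icc] at hx
      have := hA x (PySem.List.mem_pyRange_one.mpr ⟨hx.1, by omega⟩)
      rw [List.mem_toFinset]
      simpa [List.contains_iff_mem] using this
    have hTEq : s.toFinset = Finset.Icc lo hi := Finset.Subset.antisymm hsub hsup
    rw [hcard, hTEq, hIcc]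
    omega
  · rw [hA]; symm
    rw [beq_eq_false_iff_ne]
    intro hEq
    have hcards : s.toFinset.card = (Finset.Icc lo hi).card := by
      rw [hIcc, ← hcard]; omega
    have hTEq : s.toFinset = Finset.Icc lo hi :=
      Finset.eq_of_subset_of_card_le hsub (le_of_eq hcards.symm)
    rw [List.all_eq_false] at hA
    obtain ⟨num, hnum, hcon⟩ := hA
    rw [PySem.List.mem_pyRange_one] at hnum
    have hin : num ∈ s.toFinset := by rw [hTEq]; exact Finset.mem_Icc.mpr ⟨hnum.1, by omega⟩
    rw [List.mem_toFinset] at hin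
    simp only [List.contains_iff_mem] at hcon
    exact hcon hin

-- ===== VERDICT (by name: the statement is the Claim_ definition above) =====
theorem consecutive_combo_spec : Claim_equal_consecutive_combo := by
  intro lst1 lst2 _ hpre
  unfold Pre_consecutive_combo at hpre
  unfold Spec_consecutive_combo consecutive_combo consecutive_combo_alt
  obtain ⟨hperm, hsort⟩ := selsort_inv (lst1 ++ lst2) (lst1 ++ lst2).length le_rfl
  set s := (List.range (lst1 ++ lst2).length).foldl pvSelStep (lst1 ++ lst2) with hs
  have hlen : s.length = (lst1 ++ lst2).length := hperm.length_eq
  have hsne : s ≠ [] := by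
    intro h
    apply hpre
    have : (lst1 ++ lst2).length = 0 := by rw [← hlen, h]; rfl
    exact List.length_eq_zero_iff.mp this
  have hlpos : 0 < s.length := List.length_pos_iff.mpr hsne
  have hpair : s.Pairwise (· ≤ ·) := by
    rw [List.pairwise_iff_getElem]
    intro i j hi hj hij
    have := hsort i j hij hj (by omega)
    rwa [List.getD_eq_getElem s 0 hi, List.getD_eq_getElem s 0 hj] at this
  have hsorted_eq : PySem.List.sorted (lst1 ++ lst2) (fun x => x) false = s :=
    PySem.List.sorted_id_eq_of_perm_of_pairwise _ _ hperm hpair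
  show (match PySem.List.pyGet? s 0, PySem.List.pyGet? s (-1) with
        | some lo, some hi => pvRangeLoop s lo (hi + 1)
        | _, _ => false)
      = (match PySem.List.pyGet? (PySem.List.sorted (lst1 ++ lst2) (fun x => x) false) (-1) with
        | none => false
        | some hi =>
          match PySem.List.pyGet? (PySem.List.sorted (lst1 ++ lst2) (fun x => x) false) 0 with
          | none => false
          | some lo => ((PySem.Set.ofList (PySem.List.sorted (lst1 ++ lst2) (fun x => x) false)).length : Int) == hi - lo + 1)
  rw [hsorted_eq]
  rw [PySem.List.pyGet?_zero, PySem.List.pyGet?_neg_one,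
      List.getElem?_eq_getElem hlpos, List.getLast?_eq_some_getLast hsne]
  show pvRangeLoop s s[0] (s.getLast hsne + 1)
      = (((PySem.Set.ofList s).length : Int) == s.getLast hsne - s[0] + 1)
  rw [pvRangeLoop_eq]
  have := range_check_eq_card s hsne hpair
  rw [List.getD_eq_getElem s 0 hlpos] at this
  exact this
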